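-- pv_equiv track=rewrite | github.com/RebecaMadi/avd | 2kr-fatorial/2kr_fatorial.py | gen_combinacoes
-- ===== SOURCE A (Python) =====
-- def gen_combinacoes(fatores: int, labels: list):
--     qnt_comb = 2**fatores
--
--     combinacoes = {}
--
--     conts = []
--     conts2 = []
--     values = []
--
--     for i in range(0, len(labels), 1):
--         combinacoes[labels[i]] = []
--         conts.append(2**(i))
--         conts2.append(0)
--         values.append(-1)
--
--     for i in range(1, qnt_comb+1, 1):
--         combinacoes["I"].append(1)
--         for j in range(1, fatores+1, 1):
--             combinacoes[labels[j]].append(values[j-1])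
--             conts2[j-1] += 1
--             if conts2[j-1] == conts[j-1]:
--                 values[j-1] *= -1
--                 conts2[j-1] = 0
--
--         for j in range(fatores+1, len(labels), 1):
--             mult = 1
--             for l in labels[j]:
--                 mult *= combinacoes[l][i-1]
--             combinacoes[labels[j]].append(mult)
--
--     return combinacoes
-- ===== SOURCE B (Python) =====
-- def gen_combinacoes(fatores: int, labels: list):
--     # Stateless rewrite: no conts/conts2/values counter arrays and no flip
--     # logic -- the sign of factor j in row r is read directly from bit (j-1)
--     # of the 0-based row index r.
--     qnt_comb = 2 ** fatores
--
--     combinacoes = {label: [] for label in labels}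
--
--     for r in range(qnt_comb):
--         combinacoes["I"].append(1)
--         for j in range(1, fatores + 1):
--             combinacoes[labels[j]].append(1 if (r >> (j - 1)) & 1 else -1)
--         for j in range(fatores + 1, len(labels)):
--             mult = 1
--             for c in labels[j]:
--                 mult *= combinacoes[c][r]
--             combinacoes[labels[j]].append(mult)
--
--     return combinacoes
-- ===== Notes on version B (the rewrite author's own statement) =====
-- stated objective: simpler
-- what changed: Removes A's three parallel counter arrays (conts, conts2, values) and their flip/reset logic entirely: the sign of factor j in row r is computed in closed form from bit (j-1) of the 0-based row index, so one bare dict replaces A's four-part mutable state.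
import Mathlib
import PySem

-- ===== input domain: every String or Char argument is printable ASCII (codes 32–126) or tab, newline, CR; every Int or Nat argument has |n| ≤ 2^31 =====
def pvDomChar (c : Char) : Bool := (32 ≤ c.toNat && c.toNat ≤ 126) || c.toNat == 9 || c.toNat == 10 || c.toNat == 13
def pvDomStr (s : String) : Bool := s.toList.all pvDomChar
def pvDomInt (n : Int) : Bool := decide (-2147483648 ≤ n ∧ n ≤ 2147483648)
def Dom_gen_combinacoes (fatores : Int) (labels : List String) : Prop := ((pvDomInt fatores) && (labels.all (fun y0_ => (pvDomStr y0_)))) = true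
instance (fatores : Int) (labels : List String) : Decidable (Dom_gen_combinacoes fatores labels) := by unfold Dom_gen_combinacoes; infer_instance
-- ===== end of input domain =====

-- B drops A's three parallel counter arrays (conts/conts2/values) and their flip logic:
-- each factor's sign is the closed form read off bit (j-1) of the 0-based row index.


-- ===== PORT A =====
-- setup loop: `for i in range(0, len(labels), 1): combinacoes[labels[i]] = []; conts.append(2**i); conts2.append(0); values.append(-1)`
def pvA_init (labels : List String) :
    PySem.Dict String (List Int) × List Int × List Int × List Int :=
  (PySem.List.pyRange 0 (labels.length : Int) 1).foldl
    (fun st i =>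
      ((st.1).insert (PySem.List.pyGetD labels i "") [],
       st.2.1 ++ [(2:Int) ^ i.toNat],          -- conts.append(2**i); exact: i ≥ 0 here
       st.2.2.1 ++ [(0:Int)],
       st.2.2.2 ++ [(-1:Int)]))
    (PySem.Dict.empty, [], [], [])

-- inner loop body over j (state = combinacoes, conts2, values; conts is read-only)
def pvA_main (labels : List String) (conts : List Int)
    (st : PySem.Dict String (List Int) × List Int × List Int) (j : Int) :
    PySem.Dict String (List Int) × List Int × List Int :=
  -- combinacoes[labels[j]].append(values[j-1]); defaults unreachable under Pre_
  let d := (st.1).modify (PySem.List.pyGetD labels j "") []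
             (fun col => col ++ [PySem.List.pyGetD st.2.2 (j-1) 0])
  let c2 := PySem.List.pyGetD st.2.1 (j-1) 0 + 1
  if c2 = PySem.List.pyGetD conts (j-1) 0 then
    (d, (st.2.1).set (j-1).toNat 0,
        (st.2.2).set (j-1).toNat (PySem.List.pyGetD st.2.2 (j-1) 0 * (-1)))
  else
    (d, (st.2.1).set (j-1).toNat c2, st.2.2)

-- second inner loop body: interaction column entry for row i
def pvA_inter (labels : List String) (i : Int)
    (d : PySem.Dict String (List Int)) (j : Int) : PySem.Dict String (List Int) :=
  let lab := PySem.List.pyGetD labels j ""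
  let mult := lab.toList.foldl
    (fun mult l => mult * PySem.List.pyGetD (d.getD (String.ofList [l]) []) (i-1) 0) 1
  d.modify lab [] (fun col => col ++ [mult])

-- outer loop body: one iteration i of `for i in range(1, qnt_comb+1, 1)`
def pvA_outer (fatores : Int) (labels : List String) (conts : List Int)
    (st : PySem.Dict String (List Int) × List Int × List Int) (i : Int) :
    PySem.Dict String (List Int) × List Int × List Int :=
  -- combinacoes["I"].append(1): KeyError when "I" is no key — excluded by Pre_
  let d0 := (st.1).modify "I" [] (fun col => col ++ [(1:Int)])
  let st1 := (PySem.List.pyRange 1 (fatores + 1) 1).foldl (pvA_main labels conts)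
               (d0, st.2.1, st.2.2)
  let d2 := (PySem.List.pyRange (fatores + 1) (labels.length : Int) 1).foldl
              (pvA_inter labels i) st1.1
  (d2, st1.2.1, st1.2.2)

def gen_combinacoes (fatores : Int) (labels : List String) : List (String × List Int) :=
  -- `2**fatores`: exact for 0 ≤ fatores (Pre_); Python raises TypeError on negative fatores
  let qnt_comb : Int := 2 ^ fatores.toNat
  let init := pvA_init labels
  let conts := init.2.1
  let final := (PySem.List.pyRange 1 (qnt_comb + 1) 1).foldl
                 (pvA_outer fatores labels conts) (init.1, init.2.2.1, init.2.2.2)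
  (final.1).items

-- ===== PORT B =====
-- interaction column entry for row r: product of the component columns' row-r entries
def pvB_inter (labels : List String) (r : Int)
    (d : PySem.Dict String (List Int)) (j : Int) : PySem.Dict String (List Int) :=
  let lab := PySem.List.pyGetD labels j ""
  let mult := lab.toList.foldl
    (fun mult c => mult * PySem.List.pyGetD (d.getD (String.ofList [c]) []) r 0) 1
  d.modify lab [] (fun col => col ++ [mult])

-- one row r: the sign of factor j is bit (j-1) of the row index (no counter state)
def pvB_row (fatores : Int) (labels : List String)
    (d : PySem.Dict String (List Int)) (r : Int) : PySem.Dict String (List Int) :=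
  let d0 := d.modify "I" [] (fun col => col ++ [(1:Int)])
  let d1 := (PySem.List.pyRange 1 (fatores + 1) 1).foldl
    (fun d j => d.modify (PySem.List.pyGetD labels j "") []
      (fun col => col ++
        [if PySem.Int.band (r >>> (j - 1).toNat) 1 = 1 then (1:Int) else -1])) d0
  (PySem.List.pyRange (fatores + 1) (labels.length : Int) 1).foldl (pvB_inter labels r) d1

def gen_combinacoes_alt (fatores : Int) (labels : List String) : List (String × List Int) :=
  -- `2**fatores`: exact for 0 ≤ fatores (Pre_); Python raises TypeError on negative fatores
  let qnt_comb : Int := 2 ^ fatores.toNat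
  -- {label: [] for label in labels}
  let d : PySem.Dict String (List Int) :=
    labels.foldl (fun d lab => d.insert lab []) PySem.Dict.empty
  ((PySem.List.pyRange 0 qnt_comb 1).foldl (pvB_row fatores labels) d).items

-- ===== PRECONDITION & SPEC =====
-- Pre_ is exactly the closed-form description of the inputs on which Python A returns
-- normally: fatores < 0 raises TypeError, "I" absent raises KeyError, labels shorter than
-- fatores+1 raises IndexError, and an interaction letter that is not "I" and not an earlier
-- label (position 1..j-1) raises KeyError/IndexError.
def Pre_gen_combinacoes (fatores : Int) (labels : List String) : Prop :=
  0 ≤ fatores ∧ fatores.toNat + 1 ≤ labels.length ∧ "I" ∈ labels ∧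
  ∀ j, j < labels.length → fatores.toNat < j →
    (labels.getD j "").toList.all
      (fun c => decide (String.ofList [c] = "I" ∨
        String.ofList [c] ∈ (labels.drop 1).take (j-1))) = true

instance (fatores : Int) (labels : List String) : Decidable (Pre_gen_combinacoes fatores labels) := by
  unfold Pre_gen_combinacoes; infer_instance

def pvWitness_gen_combinacoes : Int × List String := (2, ["I", "A", "B", "AB"])

def Spec_gen_combinacoes (fatores : Int) (labels : List String) (out : List (String × List Int)) : Prop := out = gen_combinacoes_alt fatores labels
instance (fatores : Int) (labels : List String) (out : List (String × List Int)) : Decidable (Spec_gen_combinacoes fatores labels out) := by unfold Spec_gen_combinacoes; infer_instance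

-- ===== CLAIM (what is proved, stated in full; the proofs are below) =====
def Claim_equal_gen_combinacoes : Prop := ∀ (fatores : Int) (labels : List String), Dom_gen_combinacoes fatores labels → Pre_gen_combinacoes fatores labels → Spec_gen_combinacoes fatores labels (gen_combinacoes fatores labels)

-- ===== LEMMAS AND PROOFS =====

-- proof-side abbreviations
def pvQ (fatores : Int) : Nat := 2 ^ fatores.toNat

def pvSign (r k : Nat) : Int := if (r >>> k) &&& 1 = 1 then 1 else -1

def pvD0 (labels : List String) : PySem.Dict String (List Int) :=
  labels.foldl (fun d lab => d.insert lab []) PySem.Dict.empty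

def pvConts (labels : List String) : List Int :=
  (PySem.List.pyRange 0 (labels.length : Int) 1).map (fun i => (2:Int) ^ i.toNat)

def pvC2 (n f i m : Nat) : List Int :=
  (List.range n).map (fun k =>
    if k < m then (((i+1) % 2^k : Nat) : Int) else if k < f then ((i % 2^k : Nat) : Int) else 0)

def pvV (n f i m : Nat) : List Int :=
  (List.range n).map (fun k =>
    if k < m then pvSign (i+1) k else if k < f then pvSign i k else -1)

def pvStA (fatores : Int) (labels : List String) (i : Nat) :
    PySem.Dict String (List Int) × List Int × List Int :=
  (PySem.List.pyRange 1 ((i : Int) + 1) 1).foldl (pvA_outer fatores labels (pvConts labels))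
    ((pvA_init labels).1, (pvA_init labels).2.2.1, (pvA_init labels).2.2.2)

def pvStB (fatores : Int) (labels : List String) (i : Nat) : PySem.Dict String (List Int) :=
  (PySem.List.pyRange 0 (i : Int) 1).foldl (pvB_row fatores labels) (pvD0 labels)

def pvInnerFold (fatores : Int) (labels : List String)
    (d : PySem.Dict String (List Int)) (i m : Nat) :
    PySem.Dict String (List Int) × List Int × List Int :=
  (List.range m).foldl (fun st (k : Nat) => pvA_main labels (pvConts labels) st (1 + (k:Int)))
    (d, pvC2 labels.length fatores.toNat i 0, pvV labels.length fatores.toNat i 0)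

-- canonical form of one row's main-factor appends
def pvMainB (labels : List String) (i : Nat)
    (d : PySem.Dict String (List Int)) (m : Nat) : PySem.Dict String (List Int) :=
  (List.range m).foldl
    (fun dd (k : Nat) => dd.modify (labels.getD (k+1) "") [] (fun col => col ++ [pvSign i k])) d

-- generic helpers
lemma pv_set_map_range {β : Type} (n m : Nat) (g : Nat → β) (v : β) :
    ((List.range n).map g).set m v = (List.range n).map (fun k => if k = m then v else g k) := by
  apply List.ext_getElem
  · simp
  · intro k h1 h2
    simp only [List.getElem_set, List.getElem_map, List.getElem_range]
    simp only [List.length_set, List.length_map, List.length_range] at h1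
    split_ifs with h1 h2 h3 <;> first | rfl | omega

lemma pv_sign_zero (k : Nat) : pvSign 0 k = -1 := by
  simp [pvSign]

lemma pv_sign_eq (i m : Nat) :
    (if PySem.Int.band ((i:Int) >>> m) 1 = 1 then (1:Int) else -1) = pvSign i m := by
  have h1 : ((i:Int) >>> m) = ((i >>> m : Nat) : Int) := Int.mem_toNat?.mp rfl
  rw [h1, PySem.Int.band_one, show (2:Int) = ((2:Nat):Int) by norm_num, PySem.Int.mod_natCast]
  unfold pvSign
  rw [Nat.and_one_is_mod]
  by_cases h : (i >>> m) % 2 = 1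
  · rw [if_pos (by exact_mod_cast h), if_pos h]
  · rw [if_neg (fun hc => h (by exact_mod_cast hc)), if_neg h]

lemma pv_mod_eq (i m : Nat) (h : i % 2^m + 1 = 2^m) :
    (i+1) % 2^m = 0 ∧ pvSign (i+1) m = pvSign i m * (-1) := by
  have h2 : 0 < 2^m := Nat.two_pow_pos m
  have hi1 : i + 1 = 2^m * (i / 2^m + 1) := by
    calc i + 1 = 2^m * (i / 2^m) + (i % 2^m + 1) := by
          have := Nat.div_add_mod i (2^m); omega
    _ = 2^m * (i / 2^m) + 2^m := by rw [h]
    _ = 2^m * (i / 2^m + 1) := by ring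
  have hdiv : (i+1) / 2^m = i / 2^m + 1 := by
    rw [hi1, Nat.mul_div_cancel_left _ h2]
  have hmod : (i+1) % 2^m = 0 := by
    rw [hi1]; exact Nat.mul_mod_right _ _
  refine ⟨hmod, ?_⟩
  simp only [pvSign, Nat.shiftRight_eq_div_pow, Nat.and_one_is_mod, hdiv]
  rcases Nat.even_or_odd (i / 2^m) with he | ho
  · have h1 : i / 2^m % 2 = 0 := Nat.even_iff.mp he
    have h2' : (i / 2^m + 1) % 2 = 1 := by omega
    simp [h1, h2']
  · have h1 : i / 2^m % 2 = 1 := Nat.odd_iff.mp ho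
    have h2' : (i / 2^m + 1) % 2 = 0 := by omega
    simp [h1, h2']

lemma pv_mod_ne (i m : Nat) (h : i % 2^m + 1 ≠ 2^m) :
    (i+1) % 2^m = i % 2^m + 1 ∧ pvSign (i+1) m = pvSign i m := by
  have h2 : 0 < 2^m := Nat.two_pow_pos m
  have hlt : i % 2^m < 2^m := Nat.mod_lt _ h2
  have hlt2 : i % 2^m + 1 < 2^m := by omega
  have hi1 : i + 1 = (i % 2^m + 1) + 2^m * (i / 2^m) := by
    have := Nat.div_add_mod i (2^m); omega
  have hdiv : (i+1) / 2^m = i / 2^m := by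
    rw [hi1, Nat.add_mul_div_left _ _ h2, Nat.div_eq_of_lt hlt2]
    omega
  have hmod : (i+1) % 2^m = i % 2^m + 1 := by
    rw [hi1, Nat.add_mul_mod_self_left, Nat.mod_eq_of_lt hlt2]
  exact ⟨hmod, by simp only [pvSign, Nat.shiftRight_eq_div_pow, hdiv]⟩

-- A-side structure
lemma pv_init_eq (labels : List String) :
    pvA_init labels
      = (pvD0 labels, pvConts labels,
         List.replicate labels.length 0, List.replicate labels.length (-1)) := by
  unfold pvA_init
  rw [PySem.List.foldl_prod_mk
        (f := fun (d : PySem.Dict String (List Int)) (i : Int) =>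
          d.insert (PySem.List.pyGetD labels i "") [])
        (g := fun (t : List Int × List Int × List Int) (i : Int) =>
          (t.1 ++ [(2:Int) ^ i.toNat], t.2.1 ++ [(0:Int)], t.2.2 ++ [(-1:Int)]))]
  rw [PySem.List.foldl_prod_mk
        (f := fun (t : List Int) (i : Int) => t ++ [(2:Int) ^ i.toNat])
        (g := fun (t : List Int × List Int) (i : Int) => (t.1 ++ [(0:Int)], t.2 ++ [(-1:Int)]))]
  rw [PySem.List.foldl_prod_mk
        (f := fun (t : List Int) (_ : Int) => t ++ [(0:Int)])
        (g := fun (t : List Int) (_ : Int) => t ++ [(-1:Int)])]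
  rw [PySem.List.foldl_pyRange_zero_pyGetD' labels ""
        (fun (d : PySem.Dict String (List Int)) (lab : String) => d.insert lab [])
        PySem.Dict.empty]
  rw [PySem.List.foldl_append_singleton_eq_map (fun (i : Int) => (2:Int) ^ i.toNat),
      PySem.List.foldl_append_singleton_eq_map (fun (_ : Int) => (0:Int)),
      PySem.List.foldl_append_singleton_eq_map (fun (_ : Int) => (-1:Int))]
  refine congrArg₂ _ rfl (congrArg₂ _ rfl (congrArg₂ _ ?_ ?_)) <;>
    simp [List.map_const', PySem.List.length_pyRange_one]

lemma pv_stA_zero (fatores : Int) (labels : List String) :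
    pvStA fatores labels 0
      = (pvD0 labels, List.replicate labels.length 0, List.replicate labels.length (-1)) := by
  unfold pvStA
  rw [PySem.List.pyRange_one_eq_nil (by omega), List.foldl_nil, pv_init_eq]

lemma pv_stA_succ (fatores : Int) (labels : List String) (i : Nat) :
    pvStA fatores labels (i+1)
      = pvA_outer fatores labels (pvConts labels) (pvStA fatores labels i) ((i:Int)+1) := by
  unfold pvStA
  rw [show ((i+1 : Nat) : Int) + 1 = ((i:Int) + 1) + 1 by omega,
      PySem.List.pyRange_one_succ_right (by omega), List.foldl_append, List.foldl_cons,
      List.foldl_nil]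

lemma pv_stB_zero (fatores : Int) (labels : List String) :
    pvStB fatores labels 0 = pvD0 labels := by
  unfold pvStB
  rw [PySem.List.pyRange_one_eq_nil (by omega), List.foldl_nil]

lemma pv_stB_succ (fatores : Int) (labels : List String) (i : Nat) :
    pvStB fatores labels (i+1) = pvB_row fatores labels (pvStB fatores labels i) (i:Int) := by
  unfold pvStB
  rw [show ((i+1 : Nat) : Int) = ((i:Int)) + 1 by omega,
      PySem.List.pyRange_one_succ_right (by omega), List.foldl_append, List.foldl_cons,
      List.foldl_nil]

-- the inner (main-factor) loop: A's counter state vs the canonical closed-form appends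
lemma pv_innerInv (fatores : Int) (labels : List String)
    (hnl : fatores.toNat + 1 ≤ labels.length) (i : Nat)
    (d : PySem.Dict String (List Int)) :
    ∀ m, m ≤ fatores.toNat →
      (pvInnerFold fatores labels d i m).1 = pvMainB labels i d m
      ∧ (pvInnerFold fatores labels d i m).2.1 = pvC2 labels.length fatores.toNat i m
      ∧ (pvInnerFold fatores labels d i m).2.2 = pvV labels.length fatores.toNat i m := by
  intro m
  induction m with
  | zero =>
    intro _
    exact ⟨rfl, rfl, rfl⟩
  | succ m ih =>
    intro hm1
    obtain ⟨ihd, ihc, ihv⟩ := ih (by omega)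
    have hfold : pvInnerFold fatores labels d i (m+1)
        = pvA_main labels (pvConts labels) (pvInnerFold fatores labels d i m) (1 + (m:Int)) := by
      unfold pvInnerFold
      rw [List.range_succ, List.foldl_append, List.foldl_cons, List.foldl_nil]
    have hmf : m < fatores.toNat := by omega
    set st := pvInnerFold fatores labels d i m with hst
    have hkey : PySem.List.pyGetD labels (1 + (m:Int)) "" = labels.getD (m+1) "" := by
      rw [show (1 + (m:Int)) = ((m+1 : Nat) : Int) by omega,
          PySem.List.pyGetD_natCast]
    have hidx : (1 + (m:Int) - 1) = ((m : Nat) : Int) := by omega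
    have hval : PySem.List.pyGetD st.2.2 (1 + (m:Int) - 1) 0 = pvSign i m := by
      rw [hidx, PySem.List.pyGetD_natCast, ihv]
      unfold pvV
      rw [PySem.List.getD_map_range _ _ _ _ (by omega)]
      rw [if_neg (by omega), if_pos hmf]
    have hc2get : PySem.List.pyGetD st.2.1 (1 + (m:Int) - 1) 0 = ((i % 2^m : Nat) : Int) := by
      rw [hidx, PySem.List.pyGetD_natCast, ihc]
      unfold pvC2
      rw [PySem.List.getD_map_range _ _ _ _ (by omega)]
      rw [if_neg (by omega), if_pos hmf]
    have hcont : PySem.List.pyGetD (pvConts labels) (1 + (m:Int) - 1) 0 = (2:Int)^m := by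
      rw [hidx]
      unfold pvConts
      rw [PySem.List.pyGetD_map_pyRange _ labels.length m _ (by omega), Int.toNat_natCast]
    have hidx2 : (1 + (m:Int) - 1).toNat = m := by omega
    have hmainB : pvMainB labels i d (m+1)
        = (pvMainB labels i d m).modify (labels.getD (m+1) "") []
            (fun col => col ++ [pvSign i m]) := by
      unfold pvMainB
      rw [List.range_succ, List.foldl_append, List.foldl_cons, List.foldl_nil]
    rw [hfold]
    simp only [pvA_main]
    rw [hkey, hval, hc2get, hcont, hidx2]
    by_cases hflip : i % 2^m + 1 = 2^m
    · rw [if_pos (show ((i % 2^m : Nat) : Int) + 1 = 2^m by exact_mod_cast hflip)]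
      obtain ⟨hmod, hsgn⟩ := pv_mod_eq i m hflip
      refine ⟨by rw [hmainB, ihd], ?_, ?_⟩
      · rw [ihc]
        unfold pvC2
        rw [pv_set_map_range _ _ _ _]
        refine List.map_congr_left ?_
        intro k hkr
        rcases Nat.lt_trichotomy k m with h | h | h
        · rw [if_neg (show ¬k = m by omega), if_pos (show k < m by omega),
              if_pos (show k < m+1 by omega)]
        · rw [h, if_pos rfl, if_pos (show m < m+1 by omega), hmod]
          simp
        · rw [if_neg (show ¬k = m by omega), if_neg (show ¬k < m by omega),
              if_neg (show ¬k < m+1 by omega)]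
      · rw [ihv]
        unfold pvV
        rw [pv_set_map_range _ _ _ _]
        refine List.map_congr_left ?_
        intro k hkr
        rcases Nat.lt_trichotomy k m with h | h | h
        · rw [if_neg (show ¬k = m by omega), if_pos (show k < m by omega),
              if_pos (show k < m+1 by omega)]
        · rw [h, if_pos rfl, if_pos (show m < m+1 by omega), hsgn]
        · rw [if_neg (show ¬k = m by omega), if_neg (show ¬k < m by omega),
              if_neg (show ¬k < m+1 by omega)]
    · rw [if_neg (by
        intro hcast
        apply hflip
        have : ((i % 2^m + 1 : Nat) : Int) = ((2^m : Nat) : Int) := by push_cast; push_cast at hcast; omega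
        exact_mod_cast this)]
      obtain ⟨hmod, hsgn⟩ := pv_mod_ne i m hflip
      refine ⟨by rw [hmainB, ihd], ?_, ?_⟩
      · rw [ihc]
        unfold pvC2
        rw [pv_set_map_range _ _ _ _]
        refine List.map_congr_left ?_
        intro k hkr
        rcases Nat.lt_trichotomy k m with h | h | h
        · rw [if_neg (show ¬k = m by omega), if_pos (show k < m by omega),
              if_pos (show k < m+1 by omega)]
        · rw [h, if_pos rfl, if_pos (show m < m+1 by omega), hmod]
          push_cast
          ring
        · rw [if_neg (show ¬k = m by omega), if_neg (show ¬k < m by omega),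
              if_neg (show ¬k < m+1 by omega)]
      · rw [ihv]
        unfold pvV
        refine List.map_congr_left ?_
        intro k hkr
        rcases Nat.lt_trichotomy k m with h | h | h
        · rw [if_pos (show k < m by omega), if_pos (show k < m+1 by omega)]
        · rw [h, if_neg (show ¬m < m by omega), if_pos hmf, if_pos (show m < m+1 by omega), hsgn]
        · rw [if_neg (show ¬k < m by omega), if_neg (show ¬k < m+1 by omega)]

-- A's interaction step at Python row i+1 is B's interaction step at 0-based row i
lemma pv_inter_eq (labels : List String) (i : Nat) :
    pvA_inter labels ((i:Int)+1) = pvB_inter labels (i:Int) := by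
  funext d j
  unfold pvA_inter pvB_inter
  rw [show ((i:Int)+1-1) = (i:Int) by ring]

-- B's main-factor loop in one row is the canonical closed-form appends
lemma pv_mainB_eq (fatores : Int) (labels : List String) (h0 : 0 ≤ fatores) (i : Nat)
    (d : PySem.Dict String (List Int)) :
    (PySem.List.pyRange 1 (fatores + 1) 1).foldl
      (fun d j => d.modify (PySem.List.pyGetD labels j "") []
        (fun col => col ++
          [if PySem.Int.band ((i:Int) >>> (j - 1).toNat) 1 = 1 then (1:Int) else -1])) d
      = pvMainB labels i d fatores.toNat := by
  rw [show PySem.List.pyRange 1 (fatores+1) 1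
        = (List.range fatores.toNat).map (fun (k : Nat) => 1 + (k:Int)) by
        rw [PySem.List.pyRange_one, show (fatores+1-1).toNat = fatores.toNat by omega],
      List.foldl_map]
  unfold pvMainB
  refine PySem.List.foldl_congr_mem _ _ _ _ ?_
  intro dd k _
  rw [show (1 + (k:Int)) = ((k+1 : Nat) : Int) by omega, PySem.List.pyGetD_natCast,
      show (((k+1 : Nat) : Int) - 1).toNat = k by omega, pv_sign_eq]

-- one full outer iteration
lemma pv_row_eq (fatores : Int) (labels : List String) (h0 : 0 ≤ fatores)
    (hnl : fatores.toNat + 1 ≤ labels.length) (i : Nat)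
    (d : PySem.Dict String (List Int)) :
    pvA_outer fatores labels (pvConts labels)
      (d, pvC2 labels.length fatores.toNat i 0, pvV labels.length fatores.toNat i 0)
      ((i:Int)+1)
      = (pvB_row fatores labels d (i:Int),
         pvC2 labels.length fatores.toNat (i+1) 0,
         pvV labels.length fatores.toNat (i+1) 0) := by
  obtain ⟨innd, innc, innv⟩ :=
    pv_innerInv fatores labels hnl i
      (d.modify "I" [] (fun col => col ++ [(1:Int)])) fatores.toNat le_rfl
  have hc2eq : pvC2 labels.length fatores.toNat i fatores.toNat
      = pvC2 labels.length fatores.toNat (i+1) 0 := by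
    unfold pvC2
    refine List.map_congr_left ?_
    intro k hk
    rcases Nat.lt_or_ge k fatores.toNat with h | h
    · rw [if_pos h, if_neg (show ¬k < 0 by omega), if_pos h]
    · rw [if_neg (show ¬k < fatores.toNat from by omega),
          if_neg (show ¬k < fatores.toNat from by omega),
          if_neg (show ¬k < 0 by omega), if_neg (show ¬k < fatores.toNat from by omega)]
  have hveq : pvV labels.length fatores.toNat i fatores.toNat
      = pvV labels.length fatores.toNat (i+1) 0 := by
    unfold pvV
    refine List.map_congr_left ?_
    intro k hk
    rcases Nat.lt_or_ge k fatores.toNat with h | h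
    · rw [if_pos h, if_neg (show ¬k < 0 by omega), if_pos h]
    · rw [if_neg (show ¬k < fatores.toNat from by omega),
          if_neg (show ¬k < fatores.toNat from by omega),
          if_neg (show ¬k < 0 by omega), if_neg (show ¬k < fatores.toNat from by omega)]
  simp only [pvA_outer, pvB_row]
  rw [pv_inter_eq labels i, pv_mainB_eq fatores labels h0 i]
  rw [show PySem.List.pyRange 1 (fatores+1) 1
        = (List.range fatores.toNat).map (fun (k : Nat) => 1 + (k:Int)) by
        rw [PySem.List.pyRange_one, show (fatores+1-1).toNat = fatores.toNat by omega],
      List.foldl_map]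
  unfold pvInnerFold at innd innc innv
  rw [innd, innc, innv, hc2eq, hveq]

-- the full loop: A's state is B's dict plus the counter columns
lemma pv_state_eq (fatores : Int) (labels : List String) (h0 : 0 ≤ fatores)
    (hnl : fatores.toNat + 1 ≤ labels.length) :
    ∀ i, pvStA fatores labels i
      = (pvStB fatores labels i,
         pvC2 labels.length fatores.toNat i 0,
         pvV labels.length fatores.toNat i 0) := by
  intro i
  induction i with
  | zero =>
    rw [pv_stA_zero, pv_stB_zero]
    refine congrArg₂ _ rfl (congrArg₂ _ ?_ ?_)
    · unfold pvC2
      refine List.ext_getElem (by simp) ?_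
      intro k h1 h2
      simp only [List.getElem_replicate, List.getElem_map, List.getElem_range]
      rw [if_neg (by omega)]
      split_ifs <;> simp
    · unfold pvV
      refine List.ext_getElem (by simp) ?_
      intro k h1 h2
      simp only [List.getElem_replicate, List.getElem_map, List.getElem_range]
      rw [if_neg (by omega)]
      split_ifs with hh
      · rw [pv_sign_zero]
      · rfl
  | succ i ihi =>
    rw [pv_stA_succ, pv_stB_succ, ihi, pv_row_eq fatores labels h0 hnl i]

lemma pv_A_eq_items (fatores : Int) (labels : List String) :
    gen_combinacoes fatores labels = (pvStA fatores labels (pvQ fatores)).1.items := by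
  simp only [gen_combinacoes, pvStA, pv_init_eq]
  rw [show ((2:Int) ^ fatores.toNat) = ((pvQ fatores : Nat) : Int) by
    unfold pvQ; push_cast; ring]

lemma pv_alt_eq_items (fatores : Int) (labels : List String) :
    gen_combinacoes_alt fatores labels = (pvStB fatores labels (pvQ fatores)).items := by
  simp only [gen_combinacoes_alt, pvStB, pvD0]
  rw [show ((2:Int) ^ fatores.toNat) = ((pvQ fatores : Nat) : Int) by
    unfold pvQ; push_cast; ring]

-- ===== VERDICT (by name: the statement is the Claim_ definition above) =====
theorem gen_combinacoes_spec : Claim_equal_gen_combinacoes := by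
  intro fatores labels _ hP
  obtain ⟨h0, hnl, hI, hch⟩ := id hP
  unfold Spec_gen_combinacoes
  rw [pv_A_eq_items fatores labels, pv_alt_eq_items,
      pv_state_eq fatores labels h0 hnl (pvQ fatores)]
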